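-- pv_equiv track=rewrite | github.com/ImGeuntae/CodingTest | 백준/Gold/1043. 거짓말/거짓말.py | f
-- ===== SOURCE A (Python) =====
-- def f(s1,s2):
--     S = []
--     for s in s2:
--         if s&s1:
--             s1 = s|s1
--             s1,S = f(s1,S)
--         else:
--             S += [s]
--     return s1,S
-- ===== SOURCE B (Python) =====
-- def f(s1, s2):
--     # Iterative worklist instead of A's recursion: on absorbing a party,
--     # the kept parties are moved back onto the pending queue for re-checking.
--     kept = []
--     pend = list(s2)
--     while pend:
--         s = pend.pop(0)
--         if s & s1:
--             s1 = s | s1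
--             pend = kept + pend
--             kept = []
--         else:
--             kept.append(s)
--     return s1, kept
-- ===== Notes on version B (the rewrite author's own statement) =====
-- stated objective: alternative
-- what changed: A's nested self-recursion (re-calling f on the kept list after each absorption) is replaced by a single iterative worklist loop that moves the kept parties back onto the pending queue when a party is absorbed.
import Mathlib
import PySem

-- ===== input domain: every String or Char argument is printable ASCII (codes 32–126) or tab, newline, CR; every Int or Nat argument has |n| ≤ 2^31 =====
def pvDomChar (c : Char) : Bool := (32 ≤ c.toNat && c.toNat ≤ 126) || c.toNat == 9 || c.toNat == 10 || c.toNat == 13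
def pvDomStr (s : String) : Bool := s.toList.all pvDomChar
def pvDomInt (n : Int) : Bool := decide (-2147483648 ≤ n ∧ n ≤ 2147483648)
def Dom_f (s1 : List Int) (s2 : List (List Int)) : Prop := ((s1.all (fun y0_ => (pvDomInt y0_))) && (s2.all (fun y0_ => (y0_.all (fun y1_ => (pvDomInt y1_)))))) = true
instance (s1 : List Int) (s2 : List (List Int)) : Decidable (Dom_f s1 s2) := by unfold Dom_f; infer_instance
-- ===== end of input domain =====

-- B replaces A's nested self-recursion by one iterative worklist loop (same cost, no recursion).

-- ===== PORT A =====
-- A's for-loop over `rest` with accumulator S and the recursive call 'f(s1, S)'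
-- inside the loop; the subtype bound (the returned S is never longer than the
-- input lists) only serves termination.
def fGo (s1 : List Int) (S rest : List (List Int)) :
    {r : List Int × List (List Int) // r.2.length ≤ S.length + rest.length} :=
  match rest with
  | [] => ⟨(s1, S), by simp⟩
  | s :: rs =>
    if PySem.Set.inter s s1 ≠ [] then
      -- s1 = s|s1 ; s1, S = f(s1, S) ; continue the loop over rs
      match fGo (PySem.Set.union s s1) [] S with
      | ⟨p, hp⟩ =>
        match fGo p.1 p.2 rs with
        | ⟨q, hq⟩ => ⟨q, by
            simp only [List.length_nil, List.length_cons] at *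
            omega⟩
    else
      -- S += [s]
      match fGo s1 (S ++ [s]) rs with
      | ⟨p, hp⟩ => ⟨p, by
          simp only [List.length_append, List.length_cons, List.length_nil] at *
          omega⟩
termination_by (S.length + rest.length, rest.length)
decreasing_by
  · simp only [List.length_nil, List.length_cons]; omega
  · simp only [List.length_nil, List.length_cons] at *
    omega
  · simp only [List.length_append, List.length_cons, List.length_nil]; omega

def f (s1 : List Int) (s2 : List (List Int)) : List Int × List (List Int) :=
  (fGo s1 [] s2).val

-- ===== PORT B =====
-- the worklist loop of Source B: state (s1, kept, pend); on a hit the kept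
-- parties go back to the front of the pending queue.
def fAltGo (s1 : List Int) (kept pend : List (List Int)) : List Int × List (List Int) :=
  match pend with
  | [] => (s1, kept)
  | s :: ps =>
    if PySem.Set.inter s s1 ≠ [] then
      fAltGo (PySem.Set.union s s1) [] (kept ++ ps)
    else
      fAltGo s1 (kept ++ [s]) ps
termination_by (kept.length + pend.length, pend.length)
decreasing_by
  · simp only [List.length_nil, List.length_append, List.length_cons]; omega
  · simp only [List.length_append, List.length_cons, List.length_nil]; omega

def f_alt (s1 : List Int) (s2 : List (List Int)) : List Int × List (List Int) :=
  fAltGo s1 [] s2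

-- ===== PRECONDITION & SPEC =====
def Spec_f (s1 : List Int) (s2 : List (List Int)) (out : List Int × List (List Int)) : Prop := out = f_alt s1 s2
instance (s1 : List Int) (s2 : List (List Int)) (out : List Int × List (List Int)) : Decidable (Spec_f s1 s2 out) := by unfold Spec_f; infer_instance

-- ===== CLAIM (what is proved, stated in full; the proofs are below) =====
def Claim_equal_f : Prop := ∀ (s1 : List Int) (s2 : List (List Int)), Dom_f s1 s2 → Spec_f s1 s2 (f s1 s2)

-- ===== LEMMAS AND PROOFS =====

-- Splitting B's loop: running on xs ++ ys = running on xs, then on ys from the reached state.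
theorem fAltGo_append (s1 : List Int) (kept xs ys : List (List Int)) :
    fAltGo s1 kept (xs ++ ys)
      = fAltGo (fAltGo s1 kept xs).1 (fAltGo s1 kept xs).2 ys := by
  match xs with
  | [] => simp [fAltGo]
  | s :: xs' =>
    by_cases h : PySem.Set.inter s s1 ≠ []
    · rw [List.cons_append, fAltGo, if_pos h, ← List.append_assoc,
        fAltGo_append (PySem.Set.union s s1) [] (kept ++ xs') ys]
      conv_rhs => rw [fAltGo, if_pos h]
    · rw [List.cons_append, fAltGo, if_neg h,
        fAltGo_append s1 (kept ++ [s]) xs' ys]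
      conv_rhs => rw [fAltGo, if_neg h]
termination_by (kept.length + xs.length, xs.length)
decreasing_by
  · simp only [List.length_nil, List.length_append, List.length_cons]; omega
  · simp only [List.length_append, List.length_cons, List.length_nil]; omega

-- The two loops compute the same pair from any state.
theorem fGo_eq_fAltGo (s1 : List Int) (S rest : List (List Int)) :
    (fGo s1 S rest).val = fAltGo s1 S rest := by
  match rest with
  | [] => simp [fGo, fAltGo]
  | s :: rs =>
    by_cases h : PySem.Set.inter s s1 ≠ []
    · rw [fGo]
      simp only [if_pos h]
      rw [fGo_eq_fAltGo (fGo (PySem.Set.union s s1) [] S).val.1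
            (fGo (PySem.Set.union s s1) [] S).val.2 rs,
          fGo_eq_fAltGo (PySem.Set.union s s1) [] S,
          ← fAltGo_append (PySem.Set.union s s1) [] S rs]
      conv_rhs => rw [fAltGo, if_pos h]
    · rw [fGo]
      simp only [if_neg h]
      rw [fGo_eq_fAltGo s1 (S ++ [s]) rs]
      conv_rhs => rw [fAltGo, if_neg h]
termination_by (S.length + rest.length, rest.length)
decreasing_by
  · have := (fGo (PySem.Set.union s s1) [] S).property
    simp only [List.length_nil, List.length_cons] at *
    omega
  · simp only [List.length_nil, List.length_cons]; omega
  · simp only [List.length_append, List.length_cons, List.length_nil]; omega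

-- ===== VERDICT (by name: the statement is the Claim_ definition above) =====
theorem f_spec : Claim_equal_f := by
  intro s1 s2 _
  unfold Spec_f f f_alt
  exact fGo_eq_fAltGo s1 [] s2
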